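-- pv_equiv track=rewrite | github.com/SubTropica/SubTropica | ui/normalize-symbols.py | find_letter_group
-- ===== SOURCE A (Python) =====
-- def find_letter_group(term):
--     """Locate the (letters) group at the end of a term.
--
--     Returns (prefix, letter_content, had_comma) or None.
--     """
--     stripped = term.rstrip()
--     if not stripped.endswith(')'):
--         return None
--     depth = 0
--     for i in range(len(stripped) - 1, -1, -1):
--         if stripped[i] == ')':
--             depth += 1
--         elif stripped[i] == '(':
--             depth -= 1
--             if depth == 0:
--                 content = stripped[i + 1:-1]
--                 prefix = stripped[:i]
--                 had_comma = prefix.endswith('\\,')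
--                 if had_comma:
--                     prefix = prefix[:-2]
--                 return prefix, content, had_comma
--     return None
-- ===== SOURCE B (Python) =====
-- def find_letter_group(term):
--     """Locate the (letters) group at the end of a term.
--
--     Returns (prefix, letter_content, had_comma) or None.
--     """
--     stripped = term.rstrip()
--     if not stripped.endswith(')'):
--         return None
--     # Forward scan with a stack of indices of unmatched '(' characters;
--     # the pop performed by the final ')' (the last character) is the match.
--     stack = []
--     match = None
--     for i, ch in enumerate(stripped):
--         if ch == '(':
--             stack.append(i)
--         elif ch == ')':
--             match = stack.pop() if stack else None
--     if match is None:
--         return None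
--     content = stripped[match + 1:-1]
--     prefix = stripped[:match]
--     had_comma = prefix.endswith('\\,')
--     if had_comma:
--         prefix = prefix[:-2]
--     return prefix, content, had_comma
-- ===== Notes on version B (the rewrite author's own statement) =====
-- stated objective: alternative
-- what changed: B replaces A's backward depth-counter scan from the end with a single forward left-to-right pass maintaining a stack of indices of unmatched opening parentheses; the index popped by the final closing parenthesis is the matching open position.
import Mathlib
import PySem

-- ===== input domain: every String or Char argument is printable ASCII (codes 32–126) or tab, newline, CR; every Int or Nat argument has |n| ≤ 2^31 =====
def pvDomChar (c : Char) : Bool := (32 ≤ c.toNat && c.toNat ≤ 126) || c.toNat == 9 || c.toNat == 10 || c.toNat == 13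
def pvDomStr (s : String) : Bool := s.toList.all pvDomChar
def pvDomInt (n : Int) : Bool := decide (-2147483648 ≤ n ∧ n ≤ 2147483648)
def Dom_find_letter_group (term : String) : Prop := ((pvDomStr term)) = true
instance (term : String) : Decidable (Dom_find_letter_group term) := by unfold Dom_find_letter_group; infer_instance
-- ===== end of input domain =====

-- B replaces A's backward depth-counter scan with a forward pass keeping a stack of
-- unmatched '(' indices; the pop performed by the final ')' yields the group (same cost).

-- ===== PORT A =====
-- A's 'for i in range(len(stripped)-1, -1, -1)' with early return, as structural
-- recursion over the reversed enumeration of stripped (same indices, same order).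
def findLoopA (cs : List Char) (rev : List (Int × Char)) (depth : Int) :
    Option (String × String × Bool) :=
  match rev with
  | [] => none
  | (i, c) :: rest =>
    if c = ')' then findLoopA cs rest (depth + 1)
    else if c = '(' then
      if depth - 1 = 0 then
        let content := PySem.List.slice cs (some (i + 1)) (some (-1))
        let pre := PySem.List.slice cs none (some i)
        let hadComma := PySem.Chars.endswith pre ['\\', ',']
        let pre' := if hadComma then PySem.List.slice pre none (some (-2)) else pre
        some (String.ofList pre', String.ofList content, hadComma)
      else findLoopA cs rest (depth - 1)
    else findLoopA cs rest depth

def find_letter_group (term : String) : Option (String × String × Bool) :=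
  let stripped := PySem.Chars.rstrip term.toList
  if PySem.Chars.endswith stripped [')'] then
    findLoopA stripped ((PySem.List.enumerate stripped).reverse) 0
  else none

-- ===== PORT B =====
-- one forward step of B's loop: push an index on '(', pop (recording the match) on ')'
def stepB (sm : List Int × Option Int) (p : Int × Char) : List Int × Option Int :=
  if p.2 = '(' then (p.1 :: sm.1, sm.2)
  else if p.2 = ')' then
    match sm.1 with
    | [] => ([], none)
    | j :: st => (st, some j)
  else sm

def find_letter_group_alt (term : String) : Option (String × String × Bool) :=
  let stripped := PySem.Chars.rstrip term.toList
  if PySem.Chars.endswith stripped [')'] then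
    let sm := (PySem.List.enumerate stripped).foldl stepB ([], none)
    match sm.2 with
    | none => none
    | some j =>
      let content := PySem.List.slice stripped (some (j + 1)) (some (-1))
      let pre := PySem.List.slice stripped none (some j)
      let hadComma := PySem.Chars.endswith pre ['\\', ',']
      let pre' := if hadComma then PySem.List.slice pre none (some (-2)) else pre
      some (String.ofList pre', String.ofList content, hadComma)
  else none

-- ===== PRECONDITION & SPEC =====
def Spec_find_letter_group (term : String) (out : Option (String × String × Bool)) : Prop := out = find_letter_group_alt term
instance (term : String) (out : Option (String × String × Bool)) : Decidable (Spec_find_letter_group term out) := by unfold Spec_find_letter_group; infer_instance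

-- ===== CLAIM (what is proved, stated in full; the proofs are below) =====
def Claim_equal_find_letter_group : Prop := ∀ (term : String), Dom_find_letter_group term → Spec_find_letter_group term (find_letter_group term)

-- ===== LEMMAS AND PROOFS =====

-- assembly of the result from the matched '(' index (identical code in both ports)
def pvMk (cs : List Char) (i : Int) : Option (String × String × Bool) :=
  let content := PySem.List.slice cs (some (i + 1)) (some (-1))
  let pre := PySem.List.slice cs none (some i)
  let hadComma := PySem.Chars.endswith pre ['\\', ',']
  let pre' := if hadComma then PySem.List.slice pre none (some (-2)) else pre
  some (String.ofList pre', String.ofList content, hadComma)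

-- the stack component of B's fold, on its own
def stepS (st : List Int) (p : Int × Char) : List Int :=
  if p.2 = '(' then p.1 :: st
  else if p.2 = ')' then st.tail
  else st

theorem fst_foldl_stepB (e : List (Int × Char)) (sm : List Int × Option Int) :
    (e.foldl stepB sm).1 = e.foldl stepS sm.1 := by
  induction e generalizing sm with
  | nil => rfl
  | cons p rest ih =>
    simp only [List.foldl_cons]
    rw [ih]
    congr 1
    rcases p with ⟨i, c⟩
    by_cases h1 : c = '('
    · simp [stepB, stepS, h1]
    · by_cases h2 : c = ')'
      · rcases sm with ⟨st, m⟩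
        cases st <;> simp [stepB, stepS, h2]
      · simp [stepB, stepS, h1, h2]

theorem keyA' (cs : List Char) (e : List (Int × Char)) :
    ∀ d : Int, 1 ≤ d →
      findLoopA cs e.reverse d =
        match (e.foldl stepS [])[(d - 1).toNat]? with
        | none => none
        | some j => pvMk cs j := by
  induction e using List.reverseRecOn with
  | nil => intro d _; simp [findLoopA]
  | append_singleton f x ih =>
    intro d hd
    rcases x with ⟨i, c⟩
    rw [List.reverse_append, List.reverse_singleton, List.singleton_append,
      List.foldl_append, List.foldl_cons, List.foldl_nil]
    by_cases h1 : c = ')'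
    · have h2 : c ≠ '(' := by simp [h1]
      rw [show findLoopA cs ((i, c) :: f.reverse) d = findLoopA cs f.reverse (d + 1) by
        simp [findLoopA, h1]]
      rw [ih (d + 1) (by omega)]
      have : stepS (f.foldl stepS []) (i, c) = (f.foldl stepS []).tail := by
        simp [stepS, h1]
      rw [this, List.getElem?_tail]
      have : (d - 1).toNat + 1 = (d + 1 - 1).toNat := by omega
      rw [this]
    · by_cases h2 : c = '('
      · have hs : stepS (f.foldl stepS []) (i, c) = i :: f.foldl stepS [] := by
          simp [stepS, h2]
        rw [hs]
        by_cases h3 : d = 1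
        · subst h3
          simp [findLoopA, h2, pvMk]
        · have hd2 : 2 ≤ d := by omega
          have hne : ¬(d - 1 = 0) := by omega
          rw [show findLoopA cs ((i, c) :: f.reverse) d = findLoopA cs f.reverse (d - 1) by
            simp [findLoopA, h2, hne]]
          rw [ih (d - 1) (by omega)]
          have : (d - 1).toNat = (d - 1 - 1).toNat + 1 := by omega
          rw [this, List.getElem?_cons_succ]
      · have hs : stepS (f.foldl stepS []) (i, c) = f.foldl stepS [] := by
          simp [stepS, h1, h2]
        rw [hs, show findLoopA cs ((i, c) :: f.reverse) d = findLoopA cs f.reverse d by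
          simp [findLoopA, h1, h2]]
        exact ih d hd

-- ===== VERDICT (by name: the statement is the Claim_ definition above) =====
theorem find_letter_group_spec : Claim_equal_find_letter_group := by
  intro term _
  unfold Spec_find_letter_group find_letter_group find_letter_group_alt
  set s := PySem.Chars.rstrip term.toList with hs
  by_cases hend : PySem.Chars.endswith s [')'] = true
  · simp only [hend, if_true]
    obtain ⟨w, hw⟩ : ∃ w, s = w ++ [')'] := by
      have := (PySem.Chars.endswith_iff s [')']).mp hend
      obtain ⟨w, hw⟩ := this
      exact ⟨w, hw.symm⟩
    rw [hw]
    rw [PySem.List.enumerate_append]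
    -- A side
    rw [List.reverse_append]
    have hA : (PySem.List.enumerate [')'] (0 + (w.length : Int))).reverse = [((w.length : Int), ')')] := by
      simp [PySem.List.enumerate_cons, PySem.List.enumerate_nil]
    rw [hA, List.singleton_append,
      show ∀ rest, findLoopA (w ++ [')']) (((w.length : Int), ')') :: rest) 0 =
        findLoopA (w ++ [')']) rest 1 by intro rest; simp [findLoopA]]
    rw [keyA' (w ++ [')']) (PySem.List.enumerate w 0) 1 (by omega)]
    -- B side
    rw [List.foldl_append]
    have hE : PySem.List.enumerate [')'] ((0 : Int) + (w.length : Int)) =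
        [(((0 : Int) + (w.length : Int)), ')')] := by
      simp [PySem.List.enumerate_cons, PySem.List.enumerate_nil]
    rw [hE, List.foldl_cons, List.foldl_nil]
    have hstack : ((PySem.List.enumerate w 0).foldl stepB ([], none)).1 =
        (PySem.List.enumerate w 0).foldl stepS [] := fst_foldl_stepB _ _
    rcases hsm : (PySem.List.enumerate w 0).foldl stepB ([], none) with ⟨st, m⟩
    have hst : st = (PySem.List.enumerate w 0).foldl stepS [] := by
      rw [← hstack, hsm]
    rw [← hst]
    have : (1 - 1 : Int).toNat = 0 := by norm_num
    rw [this]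
    cases st with
    | nil => simp [stepB]
    | cons j t => simp [stepB, pvMk]
  · simp [hend]
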